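-- pv_equiv track=rewrite | github.com/karlaHH/DeteccionDePlagios | OCRs/sinComentarios/ocr21.py | CortesMitadVertical
-- ===== SOURCE A (Python) =====
-- def CortesMitadVertical(imagenmatriz,numfilas,numcolumnas):
--
--     apuntadoractual = 0
--
--     apuntadordelantero = 0
--
--     cortes = 0
--
--     filauno = 0
--
--     mitadcolumnas = int(numcolumnas/2)
--
--     for x in range(numfilas):
--
--         apuntadoractual = imagenmatriz[x][mitadcolumnas]
--
--         if(x<numfilas-1):
--
--             apuntadordelantero = imagenmatriz[x+1][mitadcolumnas]
--
--             if((apuntadordelantero!=apuntadoractual and apuntadordelantero==1) or (filauno==0 and imagenmatriz[0][mitadcolumnas]==1)):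
--
--                 cortes = cortes + 1
--
--                 filauno = filauno + 1
--
--     return cortes
-- ===== SOURCE B (Python) =====
-- def CortesMitadVertical(imagenmatriz, numfilas, numcolumnas):
--     # Runs-of-ones counting identity: each maximal run of k ones contributes
--     # k ones and k-1 adjacent (1,1) pairs, so #runs = #ones - #adjacent pairs.
--     mitadcolumnas = int(numcolumnas / 2)
--     col = [imagenmatriz[x][mitadcolumnas] for x in range(numfilas)]
--     ones = sum(1 for v in col if v == 1)
--     pares = sum(1 for a, b in zip(col, col[1:]) if a == 1 and b == 1)
--     return ones - pares
-- ===== Notes on version B (the rewrite author's own statement) =====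
-- stated objective: alternative
-- what changed: Replaces A's stateful look-ahead scan (compare row x with row x+1 plus a first-row flag) with the counting identity #runs-of-ones = #ones - #adjacent(1,1) pairs: B materializes the middle column once and computes two independent stateless counts (ones, and pairs over zip(col, col[1:])), subtracting them.
-- intended difference: When numfilas == 1 and the middle pixel of the single row is 1, A returns 0 because its look-ahead loop never reaches the counting branch, while B returns 1, the intended count of one vertical run of 1s. — e.g. on CortesMitadVertical([[1]], 1, 1): A returns 0, B returns 1
import Mathlib
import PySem

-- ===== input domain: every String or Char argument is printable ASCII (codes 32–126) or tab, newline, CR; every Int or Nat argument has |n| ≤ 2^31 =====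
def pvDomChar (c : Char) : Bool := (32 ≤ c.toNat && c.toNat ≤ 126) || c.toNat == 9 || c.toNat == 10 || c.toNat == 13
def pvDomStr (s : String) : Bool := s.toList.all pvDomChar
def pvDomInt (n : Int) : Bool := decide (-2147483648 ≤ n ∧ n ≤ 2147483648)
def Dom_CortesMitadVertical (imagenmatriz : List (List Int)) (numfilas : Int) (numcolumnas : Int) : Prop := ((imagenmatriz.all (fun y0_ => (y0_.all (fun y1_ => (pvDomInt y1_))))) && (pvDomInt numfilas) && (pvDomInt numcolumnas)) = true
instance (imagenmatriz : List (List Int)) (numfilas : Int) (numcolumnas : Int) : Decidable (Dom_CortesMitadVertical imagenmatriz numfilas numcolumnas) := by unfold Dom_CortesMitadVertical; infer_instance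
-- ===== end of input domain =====

-- B replaces A's stateful look-ahead scan by the counting identity
-- #runs-of-ones = #ones − #adjacent-(1,1)-pairs over the materialized middle column
-- (objective: alternative); it intentionally returns 1 instead of A's 0 on the
-- single-row corner described at D_ below.

-- imagenmatriz[i][j] under the Pre_ guarantee that both indexings are in Python range
-- (the getD defaults are never reached inside Pre_).
def pvPix (m : List (List Int)) (i j : Int) : Int :=
  PySem.List.pyGetD (PySem.List.pyGetD m i []) j 0

-- ===== PORT A =====
def CortesMitadVertical (imagenmatriz : List (List Int)) (numfilas : Int) (numcolumnas : Int) : Int :=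
  -- int(numcolumnas/2): exact as truncating division for |numcolumnas| ≤ 2^31 < 2^53
  let mitadcolumnas := PySem.Int.truncdiv numcolumnas 2
  ((PySem.List.pyRange 0 numfilas 1).foldl
    (fun (s : Int × Int) x =>   -- s = (cortes, filauno)
      let apuntadoractual := pvPix imagenmatriz x mitadcolumnas
      if x < numfilas - 1 then
        let apuntadordelantero := pvPix imagenmatriz (x + 1) mitadcolumnas
        if (apuntadordelantero ≠ apuntadoractual ∧ apuntadordelantero = 1) ∨
           (s.2 = 0 ∧ pvPix imagenmatriz 0 mitadcolumnas = 1)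
        then (s.1 + 1, s.2 + 1) else s
      else s)
    (0, 0)).1

-- ===== PORT B =====
-- sum(1 for v in col if v == 1)
def pvOnes (l : List Int) : Int := ((l.filter (fun v => v == 1)).length : Int)
-- sum(1 for a, b in zip(col, col[1:]) if a == 1 and b == 1); col[1:] = col.tail (exact: drop 1)
def pvPares (l : List Int) : Int := (((l.zip l.tail).filter (fun p => p.1 == 1 && p.2 == 1)).length : Int)

def CortesMitadVertical_alt (imagenmatriz : List (List Int)) (numfilas : Int) (numcolumnas : Int) : Int :=
  let mitadcolumnas := PySem.Int.truncdiv numcolumnas 2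
  let col := (PySem.List.pyRange 0 numfilas 1).map (fun x => pvPix imagenmatriz x mitadcolumnas)
  pvOnes col - pvPares col

-- ===== PRECONDITION & SPEC =====
-- Exactly the inputs on which the Python A returns: every row visited by the loop
-- exists and the middle-column index is a valid Python index of it (else IndexError,
-- raised identically by A and by B).
def Pre_CortesMitadVertical (imagenmatriz : List (List Int)) (numfilas : Int) (numcolumnas : Int) : Prop :=
  numfilas ≤ (imagenmatriz.length : Int) ∧
  ∀ row ∈ imagenmatriz.take numfilas.toNat,
    PySem.Raise.InRange row.length (PySem.Int.truncdiv numcolumnas 2)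
instance (imagenmatriz : List (List Int)) (numfilas : Int) (numcolumnas : Int) : Decidable (Pre_CortesMitadVertical imagenmatriz numfilas numcolumnas) := by unfold Pre_CortesMitadVertical; infer_instance

def pvWitness_CortesMitadVertical : List (List Int) × Int × Int := ([[0, 1], [1, 0]], 2, 2)

-- When numfilas = 1 and the middle pixel of the single row is 1, A returns 0 (its
-- look-ahead loop never reaches the counting branch) while B returns 1, the intended
-- count of one vertical run of 1s in the column.
def D_CortesMitadVertical (imagenmatriz : List (List Int)) (numfilas : Int) (numcolumnas : Int) : Prop :=
  numfilas = 1 ∧ pvPix imagenmatriz 0 (PySem.Int.truncdiv numcolumnas 2) = 1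
instance (imagenmatriz : List (List Int)) (numfilas : Int) (numcolumnas : Int) : Decidable (D_CortesMitadVertical imagenmatriz numfilas numcolumnas) := by unfold D_CortesMitadVertical; infer_instance

def Spec_CortesMitadVertical (imagenmatriz : List (List Int)) (numfilas : Int) (numcolumnas : Int) (out : Int) : Prop := ¬ D_CortesMitadVertical imagenmatriz numfilas numcolumnas → out = CortesMitadVertical_alt imagenmatriz numfilas numcolumnas
instance (imagenmatriz : List (List Int)) (numfilas : Int) (numcolumnas : Int) (out : Int) : Decidable (Spec_CortesMitadVertical imagenmatriz numfilas numcolumnas out) := by unfold Spec_CortesMitadVertical; infer_instance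

def pvDiffWitness_CortesMitadVertical : List (List Int) × Int × Int := ([[1]], 1, 1)
def pvDiffWitnessOut_CortesMitadVertical : Int × Int := (0, 1)

-- ===== CLAIM (what is proved, stated in full; the proofs are below) =====
def Claim_unchanged_CortesMitadVertical : Prop := ∀ (imagenmatriz : List (List Int)) (numfilas : Int) (numcolumnas : Int), Dom_CortesMitadVertical imagenmatriz numfilas numcolumnas → Pre_CortesMitadVertical imagenmatriz numfilas numcolumnas → Spec_CortesMitadVertical imagenmatriz numfilas numcolumnas (CortesMitadVertical imagenmatriz numfilas numcolumnas)
def Claim_changed_CortesMitadVertical : Prop := Dom_CortesMitadVertical (pvDiffWitness_CortesMitadVertical.1) (pvDiffWitness_CortesMitadVertical.2.1) (pvDiffWitness_CortesMitadVertical.2.2) ∧ Pre_CortesMitadVertical (pvDiffWitness_CortesMitadVertical.1) (pvDiffWitness_CortesMitadVertical.2.1) (pvDiffWitness_CortesMitadVertical.2.2) ∧ D_CortesMitadVertical (pvDiffWitness_CortesMitadVertical.1) (pvDiffWitness_CortesMitadVertical.2.1) (pvDiffWitness_CortesMitadVertical.2.2) ∧ CortesMitadVertical (pvDiffWitness_CortesMitadVertical.1)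 (pvDiffWitness_CortesMitadVertical.2.1) (pvDiffWitness_CortesMitadVertical.2.2) = pvDiffWitnessOut_CortesMitadVertical.1 ∧ CortesMitadVertical_alt (pvDiffWitness_CortesMitadVertical.1) (pvDiffWitness_CortesMitadVertical.2.1) (pvDiffWitness_CortesMitadVertical.2.2) = pvDiffWitnessOut_CortesMitadVertical.2 ∧ pvDiffWitnessOut_CortesMitadVertical.1 ≠ pvDiffWitnessOut_CortesMitadVertical.2
def Claim_exact_CortesMitadVertical : Prop := ∀ (imagenmatriz : List (List Int)) (numfilas : Int) (numcolumnas : Int), Dom_CortesMitadVertical imagenmatriz numfilas numcolumnas → Pre_CortesMitadVertical imagenmatriz numfilas numcolumnas → D_CortesMitadVertical imagenmatriz numfilas numcolumnas → CortesMitadVertical imagenmatriz numfilas numcolumnas ≠ CortesMitadVertical_alt imagenmatriz numfilas numcolumnas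

-- ===== LEMMAS AND PROOFS =====

-- run-start counter with a previous-value register: the common yardstick both
-- programs are reduced to (A by unrolling its look-ahead loop, B by the counting
-- identity pvCrp_arith)
def pvCrp : Int → List Int → Int
  | _, [] => 0
  | p, v :: rest => (if v = 1 ∧ p ≠ 1 then 1 else 0) + pvCrp v rest

theorem pvOnes_cons (v : Int) (rest : List Int) :
    pvOnes (v :: rest) = (if v = 1 then 1 else 0) + pvOnes rest := by
  by_cases hv : v = 1 <;> simp [pvOnes, hv] <;> ring

theorem pvPares_cons (v : Int) (rest : List Int) :
    pvPares (v :: rest) = (if v = 1 ∧ rest.head? = some 1 then 1 else 0) + pvPares rest := by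
  cases rest with
  | nil => simp [pvPares]
  | cons w rs =>
    by_cases hv : v = 1 <;> by_cases hw : w = 1 <;>
      simp [pvPares, hv, hw] <;> ring

theorem pvCrp_arith : ∀ (l : List Int) (p : Int),
    pvCrp p l = pvOnes l - pvPares l - (if p = 1 ∧ l.head? = some 1 then 1 else 0) := by
  intro l
  induction l with
  | nil => intro p; simp [pvCrp, pvOnes, pvPares]
  | cons v rest ih =>
    intro p
    rw [pvCrp, pvOnes_cons, pvPares_cons, ih v]
    simp only [List.head?_cons, Option.some.injEq]
    by_cases hv : v = 1 <;> by_cases hp : p = 1 <;>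
      by_cases hh : rest.head? = some 1 <;> simp [hv, hp, hh] <;> ring

theorem pvB (l : List Int) : pvOnes l - pvPares l = pvCrp 0 l := by
  rw [pvCrp_arith]
  norm_num

theorem pvCrp_foldA (m : List (List Int)) (n mid : Int) : ∀ (k : Nat) (j a b : Int),
    j + k = n - 1 → (pvPix m 0 mid = 1 → 0 < b) →
    ((PySem.List.pyRange j (n - 1) 1).foldl
      (fun (s : Int × Int) x =>
        if (pvPix m (x + 1) mid ≠ pvPix m x mid ∧ pvPix m (x + 1) mid = 1) ∨
           (s.2 = 0 ∧ pvPix m 0 mid = 1)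
        then (s.1 + 1, s.2 + 1) else s) (a, b)).1
      = a + pvCrp (pvPix m j mid) ((PySem.List.pyRange (j + 1) n 1).map (fun x => pvPix m x mid)) := by
  intro k
  induction k with
  | zero =>
    intro j a b hk hb
    have hj : j = n - 1 := by omega
    rw [PySem.List.pyRange_one_eq_nil (by omega), PySem.List.pyRange_one_eq_nil (by omega)]
    simp [pvCrp]
  | succ k ih =>
    intro j a b hk hb
    have hjn : j < n - 1 := by omega
    rw [PySem.List.pyRange_one_cons hjn, PySem.List.pyRange_one_cons (by omega : j + 1 < n)]
    simp only [List.foldl_cons, List.map_cons, pvCrp]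
    have hsp : ¬ (b = 0 ∧ pvPix m 0 mid = 1) := by
      rintro ⟨hb0, h1⟩; have := hb h1; omega
    by_cases hP : pvPix m (j + 1) mid ≠ pvPix m j mid ∧ pvPix m (j + 1) mid = 1
    · have hcond : (pvPix m (j + 1) mid ≠ pvPix m j mid ∧ pvPix m (j + 1) mid = 1) ∨
          (b = 0 ∧ pvPix m 0 mid = 1) := Or.inl hP
      rw [if_pos hcond]
      have hif : (if pvPix m (j + 1) mid = 1 ∧ pvPix m j mid ≠ 1 then (1 : Int) else 0) = 1 := by
        rw [if_pos ⟨hP.2, by rw [← hP.2]; exact fun h => hP.1 h.symm⟩]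
      rw [ih (j + 1) (a + 1) (b + 1) (by omega) (fun h1 => by have := hb; omega)]
      rw [hif]; ring
    · have hcond : ¬ ((pvPix m (j + 1) mid ≠ pvPix m j mid ∧ pvPix m (j + 1) mid = 1) ∨
          (b = 0 ∧ pvPix m 0 mid = 1)) := by
        rintro (h | h); exact hP h; exact hsp h
      rw [if_neg hcond]
      have hif : (if pvPix m (j + 1) mid = 1 ∧ pvPix m j mid ≠ 1 then (1 : Int) else 0) = 0 := by
        rw [if_neg]; rintro ⟨h1, hne⟩; exact hP ⟨by rw [h1]; exact fun h => hne h.symm, h1⟩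
      rw [ih (j + 1) a b (by omega) hb]
      rw [hif]; ring

theorem AB_eq (m : List (List Int)) (nf nc : Int)
    (hD : ¬ D_CortesMitadVertical m nf nc) :
    CortesMitadVertical m nf nc = CortesMitadVertical_alt m nf nc := by
  simp only [CortesMitadVertical, CortesMitadVertical_alt]
  set mid := PySem.Int.truncdiv nc 2 with hmid
  rw [pvB]
  by_cases hn : nf ≤ 0
  · -- empty range: both 0
    rw [PySem.List.pyRange_one_eq_nil (by omega)]
    simp [pvCrp]
  · rcases eq_or_lt_of_le (by omega : (1 : Int) ≤ nf) with h1 | h2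
    · -- nf = 1 : A does nothing in its single iteration; B sees ¬D_ ⇒ pixel ≠ 1
      have hnf : nf = 1 := h1.symm
      subst hnf
      have hpix : pvPix m 0 mid ≠ 1 := by
        intro h; exact hD ⟨rfl, by rw [← hmid]; exact h⟩
      rw [show PySem.List.pyRange 0 1 1 = [0] from PySem.List.pyRange_one_singleton 0]
      simp [pvCrp, hpix]
    · -- nf ≥ 2
      -- A's last iteration (x = nf-1) is a no-op: split it off
      conv_lhs => rw [PySem.List.pyRange_one_append 0 (nf - 1) nf (by omega) (by omega),
        show PySem.List.pyRange (nf - 1) nf 1 = [nf - 1] by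
          have := PySem.List.pyRange_one_singleton (nf - 1)
          simpa using this]
      rw [List.foldl_append]
      simp only [List.foldl_cons, List.foldl_nil, lt_irrefl, if_false]
      -- on x ∈ [0, nf-1) the guard x < nf-1 holds
      have hcong := PySem.List.foldl_congr_mem
        (l := PySem.List.pyRange 0 (nf - 1) 1) (init := ((0 : Int), (0 : Int)))
        (f := fun (s : Int × Int) x =>
          if x < nf - 1 then
            if (pvPix m (x + 1) mid ≠ pvPix m x mid ∧ pvPix m (x + 1) mid = 1) ∨
               (s.2 = 0 ∧ pvPix m 0 mid = 1)
            then (s.1 + 1, s.2 + 1) else s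
          else s)
        (g := fun (s : Int × Int) x =>
          if (pvPix m (x + 1) mid ≠ pvPix m x mid ∧ pvPix m (x + 1) mid = 1) ∨
             (s.2 = 0 ∧ pvPix m 0 mid = 1)
          then (s.1 + 1, s.2 + 1) else s)
        (by
          intro acc x hx
          have hx' := (PySem.List.mem_pyRange_one.mp hx).2
          simp only [if_pos hx'])
      rw [hcong]
      rw [PySem.List.pyRange_one_cons (by omega : (0 : Int) < nf)]
      simp only [List.map_cons]
      by_cases hc0 : pvPix m 0 mid = 1
      · -- first row is 1: second disjunct fires at x = 0, then filauno > 0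
        rw [PySem.List.pyRange_one_cons (by omega : (0 : Int) < nf - 1)]
        simp only [List.foldl_cons]
        rw [if_pos (Or.inr ⟨by norm_num, hc0⟩)]
        rw [pvCrp_foldA m nf mid (nf - 2).toNat (0 + 1) (0 + 1) (0 + 1) (by omega)
          (fun _ => by omega)]
        have h1lt : (0 : Int) + 1 < nf := by omega
        rw [PySem.List.pyRange_one_cons h1lt]
        simp only [List.map_cons, pvCrp]
        rw [if_pos ⟨hc0, by norm_num⟩, if_neg (by rintro ⟨_, h⟩; exact h hc0)]
        ring
      · -- first row is not 1: the special disjunct never fires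
        rw [pvCrp_foldA m nf mid (nf - 1).toNat 0 0 0 (by omega) (fun h => absurd h hc0)]
        simp only [pvCrp]
        rw [if_neg (by rintro ⟨h, _⟩; exact hc0 h)]

-- ===== VERDICT (by name: the statement is the Claim_ definition above) =====
theorem CortesMitadVertical_spec : Claim_unchanged_CortesMitadVertical := by
  intro m nf nc _hDom _hPre hD
  exact AB_eq m nf nc hD

theorem CortesMitadVertical_changed : Claim_changed_CortesMitadVertical := by
  unfold Claim_changed_CortesMitadVertical; decide

theorem CortesMitadVertical_tight : Claim_exact_CortesMitadVertical := by
  intro m nf nc _hDom _hPre hD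
  obtain ⟨hnf, hpix⟩ := hD
  subst hnf
  simp only [CortesMitadVertical, CortesMitadVertical_alt]
  rw [show PySem.List.pyRange 0 1 1 = [0] from PySem.List.pyRange_one_singleton 0]
  simp [pvOnes, pvPares, hpix]
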